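-- pv_equiv track=rewrite | github.com/mabejeok/parent_recommendation_system | distance_calculation.py | postal3km
-- ===== SOURCE A (Python) =====
-- district_db = [[1, 2, 3, 4, 5, 6],
--                [7, 8],
--                [14, 15, 16],
--                [9, 10],
--                [11, 12, 13],
--                [17],
--                [18, 19],
--                [20, 21],
--                [22, 23],
--                [24, 25, 26, 27],
--                [28, 29, 30],
--                [31, 32, 33],
--                [34, 35, 36, 37],
--                [38, 39, 40, 41],
--                [42, 43, 44, 45],
--                [46, 47, 48],
--                [49, 50, 81],
--                [51, 52],
--                [53, 54, 55, 82],
--                [56, 57],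
--                [58, 59],
--                [60, 61, 62, 63, 64],
--                [65, 66, 67, 68],
--                [69, 70, 71],
--                [72, 73],
--                [77, 78],
--                [75, 76],
--                [79, 80]]
--
-- dist_count = [6, 2, 3, 2, 3, 1, 2, 2, 2, 4, 3, 3, 4, 4, 4, 3, 3, 2, 4, 2, 2, 5, 4, 3, 2, 2, 2, 2]
--
-- dbarray3k =[[6,7,15,2,14],[6,4,3,7,1],[4,5,10,9,6,8,7],[2,3,5,6,9,10],[3,4,10,21,2,6,9],[1,2,3,7,4,9],[1,6,8,9,10,3,11,12,14,13],[7,9,12,1,10,11,13,14,15],[3,7,8,10,1,6,11,12],[3,5,21,11,9,4,8],[20,21,10,12,9,8],[8,11,13,9,20,14],[12,20,19,14,8,11,15],[13,15,16,1,8,12],[1,14,16,7,8],[15,14,18,17,19],[16,18,15,14,19],[19,16,17,14],[18,28,20,13,14,16],[11,12,13,19,26,28,21],[5,10,11,23,22],[24,23,5,21],[22,24,25,21],[22,23,25],[23,27,24,26],[20,28,27,25],[25,26,28],[19,20,26,27]]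
--
-- def postal3km(homepostal):
--     a = homepostal[:2]
--     a = int(a)
--     dbctrl = 0
--     for i in range(0,27):
--         for j in range(0, dist_count[i] - 1):
--             if a == district_db[i][j]:
--                 dbctrl = i
--     return dbarray3k[dbctrl]
-- ===== SOURCE B (Python) =====
-- # Precomputed flat lookup table: district number -> its 3km distance list.
-- _dist3k = {
--     1: [6, 7, 15, 2, 14],
--     2: [6, 7, 15, 2, 14],
--     3: [6, 7, 15, 2, 14],
--     4: [6, 7, 15, 2, 14],
--     5: [6, 7, 15, 2, 14],
--     6: [6, 7, 15, 2, 14],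
--     7: [6, 4, 3, 7, 1],
--     8: [6, 4, 3, 7, 1],
--     14: [4, 5, 10, 9, 6, 8, 7],
--     15: [4, 5, 10, 9, 6, 8, 7],
--     16: [4, 5, 10, 9, 6, 8, 7],
--     9: [2, 3, 5, 6, 9, 10],
--     10: [2, 3, 5, 6, 9, 10],
--     11: [3, 4, 10, 21, 2, 6, 9],
--     12: [3, 4, 10, 21, 2, 6, 9],
--     13: [3, 4, 10, 21, 2, 6, 9],
--     17: [1, 2, 3, 7, 4, 9],
--     18: [1, 6, 8, 9, 10, 3, 11, 12, 14, 13],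
--     19: [1, 6, 8, 9, 10, 3, 11, 12, 14, 13],
--     20: [7, 9, 12, 1, 10, 11, 13, 14, 15],
--     21: [7, 9, 12, 1, 10, 11, 13, 14, 15],
--     22: [3, 7, 8, 10, 1, 6, 11, 12],
--     23: [3, 7, 8, 10, 1, 6, 11, 12],
--     24: [3, 5, 21, 11, 9, 4, 8],
--     25: [3, 5, 21, 11, 9, 4, 8],
--     26: [3, 5, 21, 11, 9, 4, 8],
--     27: [3, 5, 21, 11, 9, 4, 8],
--     28: [20, 21, 10, 12, 9, 8],
--     29: [20, 21, 10, 12, 9, 8],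
--     30: [20, 21, 10, 12, 9, 8],
--     31: [8, 11, 13, 9, 20, 14],
--     32: [8, 11, 13, 9, 20, 14],
--     33: [8, 11, 13, 9, 20, 14],
--     34: [12, 20, 19, 14, 8, 11, 15],
--     35: [12, 20, 19, 14, 8, 11, 15],
--     36: [12, 20, 19, 14, 8, 11, 15],
--     37: [12, 20, 19, 14, 8, 11, 15],
--     38: [13, 15, 16, 1, 8, 12],
--     39: [13, 15, 16, 1, 8, 12],
--     40: [13, 15, 16, 1, 8, 12],
--     41: [13, 15, 16, 1, 8, 12],
--     42: [1, 14, 16, 7, 8],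
--     43: [1, 14, 16, 7, 8],
--     44: [1, 14, 16, 7, 8],
--     45: [1, 14, 16, 7, 8],
--     46: [15, 14, 18, 17, 19],
--     47: [15, 14, 18, 17, 19],
--     48: [15, 14, 18, 17, 19],
--     49: [16, 18, 15, 14, 19],
--     50: [16, 18, 15, 14, 19],
--     81: [16, 18, 15, 14, 19],
--     51: [19, 16, 17, 14],
--     52: [19, 16, 17, 14],
--     53: [18, 28, 20, 13, 14, 16],
--     54: [18, 28, 20, 13, 14, 16],
--     55: [18, 28, 20, 13, 14, 16],
--     82: [18, 28, 20, 13, 14, 16],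
--     56: [11, 12, 13, 19, 26, 28, 21],
--     57: [11, 12, 13, 19, 26, 28, 21],
--     58: [5, 10, 11, 23, 22],
--     59: [5, 10, 11, 23, 22],
--     60: [24, 23, 5, 21],
--     61: [24, 23, 5, 21],
--     62: [24, 23, 5, 21],
--     63: [24, 23, 5, 21],
--     64: [24, 23, 5, 21],
--     65: [22, 24, 25, 21],
--     66: [22, 24, 25, 21],
--     67: [22, 24, 25, 21],
--     68: [22, 24, 25, 21],
--     69: [22, 23, 25],
--     70: [22, 23, 25],
--     71: [22, 23, 25],
--     72: [23, 27, 24, 26],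
--     73: [23, 27, 24, 26],
--     77: [20, 28, 27, 25],
--     78: [20, 28, 27, 25],
--     75: [25, 26, 28],
--     76: [25, 26, 28],
--     79: [19, 20, 26, 27],
--     80: [19, 20, 26, 27],
-- }
--
-- def postal3km(homepostal):
--     return _dist3k.get(int(homepostal[:2]), [6, 7, 15, 2, 14])
-- ===== Notes on version B (the rewrite author's own statement) =====
-- stated objective: idiomatic
-- what changed: B replaces A's per-call nested scan over the district rows by a single precomputed flat table mapping each district number directly to its distance list, so a call is one int parse plus one dict lookup with the first distance row as default.
-- intended difference: On inputs whose 2-char prefix parses to the last district of any row after the first, or to districts 79/80 in the last row -- entries A's loop bounds skip by one row and by one element per row -- A falls back to the first distance row, while B returns the distance row of the district actually containing that postal prefix, which is the intended mapping. — e.g. on postal3km("08"): A returns [6,7,15,2,14], B returns [6,4,3,7,1]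
import Mathlib
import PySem

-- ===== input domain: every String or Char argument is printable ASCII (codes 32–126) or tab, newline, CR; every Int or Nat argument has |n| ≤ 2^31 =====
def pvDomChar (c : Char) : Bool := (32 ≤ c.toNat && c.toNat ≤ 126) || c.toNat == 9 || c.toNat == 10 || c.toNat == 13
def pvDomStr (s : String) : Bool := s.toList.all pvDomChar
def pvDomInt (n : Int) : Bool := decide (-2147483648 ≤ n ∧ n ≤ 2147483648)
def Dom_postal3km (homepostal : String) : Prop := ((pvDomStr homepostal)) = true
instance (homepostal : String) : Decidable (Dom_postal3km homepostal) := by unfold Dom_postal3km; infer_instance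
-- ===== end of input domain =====

-- B replaces A's per-call nested scan over the district table by a single precomputed flat
-- lookup table (district number -> distance list); one dict lookup per call. A raises
-- ValueError when int(homepostal[:2]) fails; those inputs are outside Pre_.

-- ===== PORT A =====
def district_db : List (List Int) :=
  [[1, 2, 3, 4, 5, 6], [7, 8], [14, 15, 16], [9, 10], [11, 12, 13], [17],
   [18, 19], [20, 21], [22, 23], [24, 25, 26, 27], [28, 29, 30], [31, 32, 33],
   [34, 35, 36, 37], [38, 39, 40, 41], [42, 43, 44, 45], [46, 47, 48],
   [49, 50, 81], [51, 52], [53, 54, 55, 82], [56, 57], [58, 59],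
   [60, 61, 62, 63, 64], [65, 66, 67, 68], [69, 70, 71], [72, 73], [77, 78],
   [75, 76], [79, 80]]

def dist_count : List Int := [6, 2, 3, 2, 3, 1, 2, 2, 2, 4, 3, 3, 4, 4, 4, 3, 3, 2, 4, 2, 2, 5, 4, 3, 2, 2, 2, 2]

def dbarray3k : List (List Int) :=
  [[6,7,15,2,14],[6,4,3,7,1],[4,5,10,9,6,8,7],[2,3,5,6,9,10],[3,4,10,21,2,6,9],
   [1,2,3,7,4,9],[1,6,8,9,10,3,11,12,14,13],[7,9,12,1,10,11,13,14,15],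
   [3,7,8,10,1,6,11,12],[3,5,21,11,9,4,8],[20,21,10,12,9,8],[8,11,13,9,20,14],
   [12,20,19,14,8,11,15],[13,15,16,1,8,12],[1,14,16,7,8],[15,14,18,17,19],
   [16,18,15,14,19],[19,16,17,14],[18,28,20,13,14,16],[11,12,13,19,26,28,21],
   [5,10,11,23,22],[24,23,5,21],[22,24,25,21],[22,23,25],[23,27,24,26],
   [20,28,27,25],[25,26,28],[19,20,26,27]]

def postal3km (homepostal : String) : List Int :=
  match PySem.Int.ofStr? (PySem.Str.slice homepostal none (some 2)) with
  | none => []   -- Python raises ValueError here; outside Pre_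
  | some a =>
    let dbctrl : Int :=
      (PySem.List.pyRange 0 27 1).foldl (fun dbctrl i =>
        (PySem.List.pyRange 0 (PySem.List.pyGetD dist_count i 0 - 1) 1).foldl
          (fun dbctrl j =>
            if a == PySem.List.pyGetD (PySem.List.pyGetD district_db i []) j 0 then i else dbctrl)
          dbctrl) 0
    PySem.List.pyGetD dbarray3k dbctrl []

-- ===== PORT B =====
-- precomputed flat lookup table from Source B: district number -> its 3km distance list
def dist3k : PySem.Dict Int (List Int) := PySem.Dict.ofList
  [(1, [6, 7, 15, 2, 14]),
   (2, [6, 7, 15, 2, 14]),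
   (3, [6, 7, 15, 2, 14]),
   (4, [6, 7, 15, 2, 14]),
   (5, [6, 7, 15, 2, 14]),
   (6, [6, 7, 15, 2, 14]),
   (7, [6, 4, 3, 7, 1]),
   (8, [6, 4, 3, 7, 1]),
   (14, [4, 5, 10, 9, 6, 8, 7]),
   (15, [4, 5, 10, 9, 6, 8, 7]),
   (16, [4, 5, 10, 9, 6, 8, 7]),
   (9, [2, 3, 5, 6, 9, 10]),
   (10, [2, 3, 5, 6, 9, 10]),
   (11, [3, 4, 10, 21, 2, 6, 9]),
   (12, [3, 4, 10, 21, 2, 6, 9]),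
   (13, [3, 4, 10, 21, 2, 6, 9]),
   (17, [1, 2, 3, 7, 4, 9]),
   (18, [1, 6, 8, 9, 10, 3, 11, 12, 14, 13]),
   (19, [1, 6, 8, 9, 10, 3, 11, 12, 14, 13]),
   (20, [7, 9, 12, 1, 10, 11, 13, 14, 15]),
   (21, [7, 9, 12, 1, 10, 11, 13, 14, 15]),
   (22, [3, 7, 8, 10, 1, 6, 11, 12]),
   (23, [3, 7, 8, 10, 1, 6, 11, 12]),
   (24, [3, 5, 21, 11, 9, 4, 8]),
   (25, [3, 5, 21, 11, 9, 4, 8]),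
   (26, [3, 5, 21, 11, 9, 4, 8]),
   (27, [3, 5, 21, 11, 9, 4, 8]),
   (28, [20, 21, 10, 12, 9, 8]),
   (29, [20, 21, 10, 12, 9, 8]),
   (30, [20, 21, 10, 12, 9, 8]),
   (31, [8, 11, 13, 9, 20, 14]),
   (32, [8, 11, 13, 9, 20, 14]),
   (33, [8, 11, 13, 9, 20, 14]),
   (34, [12, 20, 19, 14, 8, 11, 15]),
   (35, [12, 20, 19, 14, 8, 11, 15]),
   (36, [12, 20, 19, 14, 8, 11, 15]),
   (37, [12, 20, 19, 14, 8, 11, 15]),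
   (38, [13, 15, 16, 1, 8, 12]),
   (39, [13, 15, 16, 1, 8, 12]),
   (40, [13, 15, 16, 1, 8, 12]),
   (41, [13, 15, 16, 1, 8, 12]),
   (42, [1, 14, 16, 7, 8]),
   (43, [1, 14, 16, 7, 8]),
   (44, [1, 14, 16, 7, 8]),
   (45, [1, 14, 16, 7, 8]),
   (46, [15, 14, 18, 17, 19]),
   (47, [15, 14, 18, 17, 19]),
   (48, [15, 14, 18, 17, 19]),
   (49, [16, 18, 15, 14, 19]),
   (50, [16, 18, 15, 14, 19]),
   (81, [16, 18, 15, 14, 19]),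
   (51, [19, 16, 17, 14]),
   (52, [19, 16, 17, 14]),
   (53, [18, 28, 20, 13, 14, 16]),
   (54, [18, 28, 20, 13, 14, 16]),
   (55, [18, 28, 20, 13, 14, 16]),
   (82, [18, 28, 20, 13, 14, 16]),
   (56, [11, 12, 13, 19, 26, 28, 21]),
   (57, [11, 12, 13, 19, 26, 28, 21]),
   (58, [5, 10, 11, 23, 22]),
   (59, [5, 10, 11, 23, 22]),
   (60, [24, 23, 5, 21]),
   (61, [24, 23, 5, 21]),
   (62, [24, 23, 5, 21]),
   (63, [24, 23, 5, 21]),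
   (64, [24, 23, 5, 21]),
   (65, [22, 24, 25, 21]),
   (66, [22, 24, 25, 21]),
   (67, [22, 24, 25, 21]),
   (68, [22, 24, 25, 21]),
   (69, [22, 23, 25]),
   (70, [22, 23, 25]),
   (71, [22, 23, 25]),
   (72, [23, 27, 24, 26]),
   (73, [23, 27, 24, 26]),
   (77, [20, 28, 27, 25]),
   (78, [20, 28, 27, 25]),
   (75, [25, 26, 28]),
   (76, [25, 26, 28]),
   (79, [19, 20, 26, 27]),
   (80, [19, 20, 26, 27])]

def postal3km_alt (homepostal : String) : List Int :=
  match PySem.Int.ofStr? (PySem.Str.slice homepostal none (some 2)) with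
  | none => []   -- Python raises ValueError here; outside Pre_
  | some a => dist3k.getD a [6, 7, 15, 2, 14]

-- ===== PRECONDITION & SPEC =====
-- Pre_ excludes exactly the inputs where int(homepostal[:2]) raises ValueError.
def Pre_postal3km (homepostal : String) : Prop :=
  (PySem.Int.ofStr? (PySem.Str.slice homepostal none (some 2))).isSome = true
instance (homepostal : String) : Decidable (Pre_postal3km homepostal) := by
  unfold Pre_postal3km; infer_instance
def pvWitness_postal3km : String := "40"

-- the districts A's off-by-one bounds never check: each row's last entry (beyond row 0) and all of row 27
def Dset : List Int := [8, 16, 10, 13, 17, 19, 21, 23, 27, 30, 33, 37, 41, 45, 48, 81, 52, 82, 57, 59, 64, 68, 71, 73, 78, 76, 79, 80]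

-- On prefixes parsing to a last-of-row district (other than row 0's) or to 79/80, A's
-- off-by-one loop bounds skip the match and A returns the first distance row;
-- B returns the distance row of the district that actually contains the prefix, the intended mapping.
def D_postal3km (homepostal : String) : Prop :=
  PySem.Int.ofChars? (homepostal.toList.take 2) ∈ Dset.map some
instance (homepostal : String) : Decidable (D_postal3km homepostal) := by
  unfold D_postal3km; infer_instance

def Spec_postal3km (homepostal : String) (out : List Int) : Prop :=
  ¬ D_postal3km homepostal → out = postal3km_alt homepostal
instance (homepostal : String) (out : List Int) : Decidable (Spec_postal3km homepostal out) := by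
  unfold Spec_postal3km; infer_instance

def pvDiffWitness_postal3km : String := "08"
def pvDiffWitnessOut_postal3km : (List Int) × (List Int) := ([6,7,15,2,14], [6,4,3,7,1])

-- ===== CLAIM (what is proved, stated in full; the proofs are below) =====
def Claim_unchanged_postal3km : Prop := ∀ (homepostal : String), Dom_postal3km homepostal → Pre_postal3km homepostal → Spec_postal3km homepostal (postal3km homepostal)
def Claim_changed_postal3km : Prop := Dom_postal3km (pvDiffWitness_postal3km) ∧ Pre_postal3km (pvDiffWitness_postal3km) ∧ D_postal3km (pvDiffWitness_postal3km) ∧ postal3km (pvDiffWitness_postal3km) = pvDiffWitnessOut_postal3km.1 ∧ postal3km_alt (pvDiffWitness_postal3km) = pvDiffWitnessOut_postal3km.2 ∧ pvDiffWitnessOut_postal3km.1 ≠ pvDiffWitnessOut_postal3km.2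
def Claim_exact_postal3km : Prop := ∀ (homepostal : String), Dom_postal3km homepostal → Pre_postal3km homepostal → D_postal3km homepostal → postal3km homepostal ≠ postal3km_alt homepostal

-- ===== LEMMAS AND PROOFS =====

-- int(homepostal[:2]) reads exactly the first two characters
lemma parse_bridge (h : String) :
    PySem.Int.ofStr? (PySem.Str.slice h none (some 2)) = PySem.Int.ofChars? (h.toList.take 2) := by
  simp [PySem.Int.ofStr?, PySem.Str.slice, PySem.List.slice_to]

-- all 81 district values, in table order
def allVals : List Int := district_db.flatten

lemma entry_mem (i j : Int) (hi : i ∈ PySem.List.pyRange 0 27 1)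
    (hj : j ∈ PySem.List.pyRange 0 (PySem.List.pyGetD dist_count i 0 - 1) 1) :
    PySem.List.pyGetD (PySem.List.pyGetD district_db i []) j 0 ∈ allVals := by
  fin_cases hi <;> fin_cases hj <;> decide

lemma dbctrlA_of_not_mem (a : Int) (hm : a ∉ allVals) :
    (PySem.List.pyRange 0 27 1).foldl (fun dbctrl i =>
        (PySem.List.pyRange 0 (PySem.List.pyGetD dist_count i 0 - 1) 1).foldl
          (fun dbctrl j =>
            if a == PySem.List.pyGetD (PySem.List.pyGetD district_db i []) j 0 then i else dbctrl)
          dbctrl) 0 = 0 := by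
  rw [PySem.List.foldl_congr_mem (g := fun acc _ => acc)]
  · simp
  · intro acc i hi
    rw [PySem.List.foldl_congr_mem (g := fun acc _ => acc)]
    · simp
    · intro acc' j hj
      have hne : a ≠ PySem.List.pyGetD (PySem.List.pyGetD district_db i []) j 0 :=
        fun he => hm (he ▸ entry_mem i j hi hj)
      simp [hne]

set_option maxRecDepth 10000 in
lemma dist3k_keys : dist3k.keys = allVals := by decide

lemma getD_of_not_mem (a : Int) (hm : a ∉ allVals) : dist3k.getD a [6, 7, 15, 2, 14] = [6, 7, 15, 2, 14] := by
  apply PySem.Dict.getD_of_not_contains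
  rw [PySem.Dict.contains_eq_decide_mem_keys, dist3k_keys]
  simp [hm]

-- ===== VERDICT (by name: the statement is the Claim_ definition above) =====
set_option maxRecDepth 40000 in
set_option maxHeartbeats 4000000 in
theorem postal3km_spec : Claim_unchanged_postal3km := by
  intro h _ hpre hD
  obtain ⟨a, hp⟩ := Option.isSome_iff_exists.mp hpre
  simp only [postal3km, postal3km_alt, hp]
  by_cases hm : a ∈ allVals
  · fin_cases hm <;>
      first
        | decide
        | (exfalso; apply hD; unfold D_postal3km; rw [← parse_bridge, hp]; decide)
  · rw [dbctrlA_of_not_mem a hm, getD_of_not_mem a hm]; decide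

set_option maxRecDepth 40000 in
theorem postal3km_changed : Claim_changed_postal3km := by
  unfold Claim_changed_postal3km; decide

set_option maxRecDepth 40000 in
set_option maxHeartbeats 2000000 in
theorem postal3km_tight : Claim_exact_postal3km := by
  intro h _ _ hD
  unfold D_postal3km at hD
  rw [← parse_bridge] at hD
  obtain ⟨a, haD, hp⟩ := List.mem_map.mp hD
  simp only [postal3km, postal3km_alt, ← hp]
  fin_cases haD <;> decide
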